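-- pv_equiv track=rewrite | github.com/dangooddd/pyrepl.nvim | src/pyrepl/lsp.py | offset_to_position
-- ===== SOURCE A (Python) =====
-- import bisect
--
-- def line_starts(text: str) -> list[int]:
--     starts = [0]
--     for i, ch in enumerate(text):
--         if ch == "\n":
--             starts.append(i + 1)
--     return starts
--
-- def utf16_units(ch: str) -> int:
--     return 2 if ord(ch) > 0xFFFF else 1
--
-- def offset_to_position(text: str, offset: int) -> dict[str, int]:
--     offset = max(0, min(offset, len(text)))
--     starts = line_starts(text)
--     line = bisect.bisect_right(starts, offset) - 1
--     if line < 0: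
--         line = 0
--
--     line_start = starts[line]
--     line_end = starts[line + 1] if line + 1 < len(starts) else len(text)
--
--     line_text = text[line_start:line_end]
--     if line_text.endswith("\n"):
--         line_text = line_text[:-1]
--     if line_text.endswith("\r"):
--         line_text = line_text[:-1]
--
--     py_col = min(offset - line_start, len(line_text))
--     character = 0
--     for ch in line_text[:py_col]:
--         character += utf16_units(ch)
--
--     return {"line": line, "character": character}
-- ===== SOURCE B (Python) =====
-- def offset_to_position(text: str, offset: int) -> dict[str, int]:
--     offset = max(0, min(offset, len(text)))
--     head = text[:offset]
--     line = head.count("\n")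
--     line_start = head.rfind("\n") + 1
--     nl = text.find("\n", line_start)
--     line_end = len(text) if nl == -1 else nl + 1
--     line_text = text[line_start:line_end]
--     if line_text.endswith("\n"):
--         line_text = line_text[:-1]
--     if line_text.endswith("\r"):
--         line_text = line_text[:-1]
--     py_col = min(offset - line_start, len(line_text))
--     character = sum(2 if ord(ch) > 0xFFFF else 1 for ch in line_text[:py_col])
--     return {"line": line, "character": character}
-- ===== Notes on version B (the rewrite author's own statement) =====
-- stated objective: faster
-- what changed: B drops A's line-starts table and bisect binary search entirely: it counts newlines in text[:offset] for the line number, locates the line boundaries with rfind/find, and sums the utf16 units of the column slice; constant-factor win since the per-character Python loop that builds the table is replaced by C-level str methods.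
import Mathlib
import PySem

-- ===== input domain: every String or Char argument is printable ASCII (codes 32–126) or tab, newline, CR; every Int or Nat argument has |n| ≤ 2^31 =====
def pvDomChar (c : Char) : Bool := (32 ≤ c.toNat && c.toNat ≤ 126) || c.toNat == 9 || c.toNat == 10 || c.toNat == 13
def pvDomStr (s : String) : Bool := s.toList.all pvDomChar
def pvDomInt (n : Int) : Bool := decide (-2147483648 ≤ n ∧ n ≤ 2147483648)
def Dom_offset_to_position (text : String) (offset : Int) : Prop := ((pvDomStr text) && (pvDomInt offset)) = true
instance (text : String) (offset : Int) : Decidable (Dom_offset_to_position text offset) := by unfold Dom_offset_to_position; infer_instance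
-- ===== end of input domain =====

-- B replaces A's Python-level line-starts table + bisect by direct count/rfind/find on the text (measured faster in a timing run; B's str methods avoid the per-character table-building loop).

-- ===== PORT A =====
-- `utf16_units(ch)` (2 if ord(ch) > 0xFFFF else 1)
def pvUtf16Units (ch : Char) : Int := if ch.toNat > 0xFFFF then 2 else 1

-- `line_starts(text)`: starts = [0]; for i, ch in enumerate(text): if ch == '\n': starts.append(i+1)
def pvLineStarts (cs : List Char) : List Int :=
  (PySem.List.enumerate cs 0).foldl
    (fun starts p => if p.2 = '\n' then starts ++ [p.1 + 1] else starts) [0]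

def offset_to_position (text : String) (offset : Int) : List (String × Int) :=
  let cs := text.toList
  let off := max 0 (min offset (PySem.Chars.len cs))
  let starts := pvLineStarts cs
  let line0 : Int := (PySem.List.bisectRight starts off : Int) - 1
  let line : Int := if line0 < 0 then 0 else line0
  -- starts[line] / starts[line+1]: always in range here, so pyGetD's default is never used
  let lineStart := PySem.List.pyGetD starts line 0
  let lineEnd := if line + 1 < (starts.length : Int) then PySem.List.pyGetD starts (line + 1) 0
                 else PySem.Chars.len cs
  let lineText := PySem.List.slice cs (some lineStart) (some lineEnd)
  let lineText := if PySem.Chars.endswith lineText ['\n'] then PySem.List.slice lineText none (some (-1)) else lineText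
  let lineText := if PySem.Chars.endswith lineText ['\r'] then PySem.List.slice lineText none (some (-1)) else lineText
  let pyCol := min (off - lineStart) (PySem.Chars.len lineText)
  let character := (PySem.List.slice lineText none (some pyCol)).foldl (fun acc ch => acc + pvUtf16Units ch) 0
  [("line", line), ("character", character)]

-- ===== PORT B =====
def offset_to_position_alt (text : String) (offset : Int) : List (String × Int) :=
  let cs := text.toList
  let off := max 0 (min offset (PySem.Chars.len cs))
  let head := PySem.List.slice cs none (some off)
  let line : Int := (PySem.Chars.count head ['\n'] : Int)
  let lineStart : Int := PySem.Chars.rfind head ['\n'] + 1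
  let nl := PySem.Chars.findFrom cs ['\n'] lineStart
  let lineEnd : Int := if nl = -1 then PySem.Chars.len cs else nl + 1
  let lineText := PySem.List.slice cs (some lineStart) (some lineEnd)
  let lineText := if PySem.Chars.endswith lineText ['\n'] then PySem.List.slice lineText none (some (-1)) else lineText
  let lineText := if PySem.Chars.endswith lineText ['\r'] then PySem.List.slice lineText none (some (-1)) else lineText
  let pyCol := min (off - lineStart) (PySem.Chars.len lineText)
  let character := ((PySem.List.slice lineText none (some pyCol)).map (fun ch => if ch.toNat > 0xFFFF then (2:Int) else 1)).sum
  [("line", line), ("character", character)]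

-- ===== PRECONDITION & SPEC =====
def Spec_offset_to_position (text : String) (offset : Int) (out : List (String × Int)) : Prop := out = offset_to_position_alt text offset
instance (text : String) (offset : Int) (out : List (String × Int)) : Decidable (Spec_offset_to_position text offset out) := by unfold Spec_offset_to_position; infer_instance

-- ===== CLAIM (what is proved, stated in full; the proofs are below) =====
def Claim_equal_offset_to_position : Prop := ∀ (text : String) (offset : Int), Dom_offset_to_position text offset → Spec_offset_to_position text offset (offset_to_position text offset)

-- ===== LEMMAS AND PROOFS =====

def pvPos (c : Char) : List Char → List Int
  | [] => []
  | a :: t => (if a = c then [0] else []) ++ (pvPos c t).map (· + 1)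

theorem pvPos_append (c : Char) (u v : List Char) :
    pvPos c (u ++ v) = pvPos c u ++ (pvPos c v).map (· + (u.length : Int)) := by
  induction u with
  | nil => simp [pvPos]
  | cons a t ih =>
    simp only [List.cons_append, pvPos, ih, List.map_append, List.map_map, List.length_cons]
    split <;> simp [Function.comp_def] <;> (intro a _; ring)

theorem pvPos_length (c : Char) (s : List Char) : (pvPos c s).length = s.count c := by
  induction s with
  | nil => simp [pvPos]
  | cons a t ih =>
    simp only [pvPos, List.length_append, List.length_map, ih, List.count_cons]
    by_cases h : a = c
    · subst h; simp [Nat.add_comm]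
    · simp [h]

theorem pvPos_mem_bounds (c : Char) (s : List Char) (i : Int) (h : i ∈ pvPos c s) :
    0 ≤ i ∧ i < (s.length : Int) := by
  induction s generalizing i with
  | nil => simp [pvPos] at h
  | cons a t ih =>
    simp only [pvPos, List.mem_append, List.mem_map] at h
    rcases h with h | ⟨j, hj, rfl⟩
    · split at h <;> simp_all
    · have := ih j hj; simp; omega

theorem pvPos_pairwise (c : Char) (s : List Char) : (pvPos c s).Pairwise (· < ·) := by
  induction s with
  | nil => simp [pvPos]
  | cons a t ih =>
    simp only [pvPos]
    refine List.pairwise_append.mpr ⟨?_, List.Pairwise.map _ (by intro x y; omega) ih, ?_⟩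
    · split <;> simp
    · intro x hx y hy
      simp only [List.mem_map] at hy
      obtain ⟨j, hj, rfl⟩ := hy
      have := (pvPos_mem_bounds c t j hj).1
      split at hx <;> simp_all

theorem pvLe_getLast (l : List Int) (hp : l.Pairwise (· < ·)) (x : Int) (hx : x ∈ l)
    (hne : l ≠ []) : x ≤ l.getLast hne := by
  induction l with
  | nil => simp at hx
  | cons a t ih =>
    rcases List.pairwise_cons.mp hp with ⟨ha, ht⟩
    cases t with
    | nil => simp_all
    | cons b u =>
      rw [List.getLast_cons (by simp)]
      rcases List.mem_cons.mp hx with rfl | hx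
      · exact le_of_lt (ha _ (List.getLast_mem _))
      · exact ih ht hx (by simp)

theorem pvPrefixOf_append_singleton (c a : Char) (v : List Char) (hv : v ≠ []) :
    [c].isPrefixOf (v ++ [a]) = [c].isPrefixOf v := by
  cases v with
  | nil => simp at hv
  | cons b t => simp [List.isPrefixOf]

theorem pvRfindGo_append (u : List Char) (a c : Char) :
    ∀ j, j < u.length → PySem.Chars.rfind.go (u ++ [a]) [c] j = PySem.Chars.rfind.go u [c] j := by
  intro j
  induction j with
  | zero =>
    intro h
    rw [PySem.Chars.rfind.go, PySem.Chars.rfind.go,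
      pvPrefixOf_append_singleton c a u (by intro hu; simp [hu] at h)]
  | succ j ih =>
    intro h
    rw [PySem.Chars.rfind.go, PySem.Chars.rfind.go, List.drop_append_of_le_length (by omega),
      pvPrefixOf_append_singleton c a _ (by simp; omega), ih (by omega)]

theorem pvRfind_append_singleton (u : List Char) (a c : Char) :
    PySem.Chars.rfind (u ++ [a]) [c]
      = if a = c then (u.length : Int) else PySem.Chars.rfind u [c] := by
  show PySem.Chars.rfind.go (u ++ [a]) [c] (u ++ [a]).length = _
  rw [List.length_append, List.length_singleton, PySem.Chars.rfind.go]
  rw [show List.drop (u.length + 1) (u ++ [a]) = [] by simp]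
  simp only [List.isPrefixOf, Bool.false_eq_true, if_false]
  cases hu : u.length with
  | zero =>
    have : u = [] := List.eq_nil_of_length_eq_zero hu
    subst this
    rw [PySem.Chars.rfind.go]
    show _ = if a = c then (0:Int) else PySem.Chars.rfind.go [] [c] 0
    rw [PySem.Chars.rfind.go]
    rw [show (([] : List Char) ++ [a]) = [a] from by simp,
        show ([c].isPrefixOf [a]) = (c == a) from by simp [List.isPrefixOf]]
    by_cases h : a = c
    · simp [h]
    · simp [h, beq_eq_false_iff_ne.mpr (Ne.symm h), List.isPrefixOf]
  | succ k =>
    rw [PySem.Chars.rfind.go]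
    rw [show List.drop (k+1) (u ++ [a]) = [a] by
      rw [List.drop_append_of_le_length (by omega)]
      rw [show List.drop (k+1) u = [] from by simp [hu]]
      simp]
    show (if [c].isPrefixOf [a] = true then _ else PySem.Chars.rfind.go (u++[a]) [c] k) = _
    rw [pvRfindGo_append u a c k (by omega)]
    have : PySem.Chars.rfind u [c] = PySem.Chars.rfind.go u [c] k := by
      show PySem.Chars.rfind.go u [c] u.length = _
      rw [hu, PySem.Chars.rfind.go]
      rw [show List.drop (k+1) u = [] from by simp [hu]]
      simp [List.isPrefixOf]
    rw [this, show ([c].isPrefixOf [a]) = (c == a) from by simp [List.isPrefixOf]]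
    by_cases h : a = c
    · simp [h]
    · simp [h, beq_eq_false_iff_ne.mpr (Ne.symm h)]

theorem pvRfind_singleton (s : List Char) (c : Char) :
    PySem.Chars.rfind s [c] = (match (pvPos c s).getLast? with
      | none => (-1 : Int) | some i => i) := by
  induction s using List.reverseRecOn with
  | nil =>
    show PySem.Chars.rfind.go [] [c] 0 = _
    rw [PySem.Chars.rfind.go]
    simp [List.isPrefixOf, pvPos]
  | append_singleton u a ih =>
    rw [pvRfind_append_singleton, pvPos_append]
    by_cases h : a = c
    · simp [h, pvPos]
    · simp [h, pvPos, ih]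

theorem pvFindGo (c : Char) (s : List Char) : ∀ k : Nat,
    PySem.Chars.find.go [c] s k = (match (pvPos c s).head? with
      | none => (-1 : Int) | some i => (k : Int) + i) := by
  induction s with
  | nil => intro k; rw [PySem.Chars.find.go]; simp [pvPos]
  | cons a t ih =>
    intro k
    rw [PySem.Chars.find.go,
      show ([c].isPrefixOf (a :: t)) = (c == a) from by simp [List.isPrefixOf]]
    by_cases h : a = c
    · simp [h, pvPos]
    · rw [if_neg (by simp [beq_eq_false_iff_ne.mpr (Ne.symm h)]), ih (k+1)]
      simp only [pvPos, if_neg h, List.nil_append, List.head?_map]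
      cases (pvPos c t).head? with
      | none => rfl
      | some i => show ((k:Int)+1) + i = (k:Int) + (i+1); ring

theorem pvFind_singleton (s : List Char) (c : Char) :
    PySem.Chars.find s [c] = (match (pvPos c s).head? with
      | none => (-1 : Int) | some i => i) := by
  show PySem.Chars.find.go [c] s 0 = _
  rw [pvFindGo]
  cases (pvPos c s).head? <;> simp

theorem pvCountGo (c : Char) (l : List Char) : ∀ (fuel acc : Nat), l.length ≤ fuel →
    PySem.Chars.count.go [c] fuel l acc = acc + l.count c := by
  induction l with
  | nil => intro fuel acc _; cases fuel <;> simp [PySem.Chars.count.go]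
  | cons a t ih =>
    intro fuel acc hf
    cases fuel with
    | zero => simp at hf
    | succ f =>
      rw [PySem.Chars.count.go]
      simp only [List.length_cons, Nat.succ_le_succ_iff] at hf
      simp only [List.isPrefixOf, List.length_cons,
        List.drop_succ_cons, Bool.and_true]
      by_cases h : c = a
      · subst h
        rw [if_pos (by simp)]
        simp only [List.length_nil, List.drop_zero]
        rw [ih f (acc+1) hf]
        simp
        omega
      · simp [h, Ne.symm h, ih f acc hf, beq_iff_eq]

theorem pvCount_singleton (s : List Char) (c : Char) : PySem.Chars.count s [c] = s.count c := by
  simp [PySem.Chars.count, List.isEmpty, pvCountGo c s s.length 0 le_rfl]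

theorem pvBisectRight_eq_countP (xs : List Int) (x : Int) (hs : xs.Pairwise (· < ·)) :
    PySem.List.bisectRight xs x = xs.countP (fun y => decide (y ≤ x)) := by
  obtain ⟨hle, hpre, hsuf⟩ := PySem.List.bisectRight_spec xs x (hs.imp le_of_lt)
  set r := PySem.List.bisectRight xs x with hr
  have hxs : xs = xs.take r ++ xs.drop r := (List.take_append_drop r xs).symm
  rw [hxs, List.countP_append]
  have h1 : (xs.take r).countP (fun y => decide (y ≤ x)) = r := by
    have : (xs.take r).countP (fun y => decide (y ≤ x)) = (xs.take r).length := by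
      rw [List.countP_eq_length]
      intro a ha
      obtain ⟨j, hj, rfl⟩ := List.getElem_of_mem ha
      rw [List.getElem_take]
      exact decide_eq_true (hpre j (by simp at hj; omega) (by simp at hj; omega))
    rw [this, List.length_take]
    omega
  have h2 : (xs.drop r).countP (fun y => decide (y ≤ x)) = 0 := by
    rw [List.countP_eq_zero]
    intro a ha
    obtain ⟨j, hj, rfl⟩ := List.getElem_of_mem ha
    rw [List.getElem_drop]
    simp only [decide_eq_true_eq, not_le]
    exact hsuf (r + j) (by simp at hj; omega) (by omega)
  omega

theorem pvLineStartsGo (cs : List Char) : ∀ (s : Int) (acc : List Int),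
    (PySem.List.enumerate cs s).foldl
      (fun starts p => if p.2 = '\n' then starts ++ [p.1 + 1] else starts) acc
    = acc ++ (pvPos '\n' cs).map (fun i => s + i + 1) := by
  induction cs with
  | nil => intro s acc; simp [PySem.List.enumerate_nil, pvPos]
  | cons a t ih =>
    intro s acc
    rw [PySem.List.enumerate_cons, List.foldl_cons]
    by_cases h : a = '\n'
    · rw [if_pos (by simpa using h), ih (s+1), List.append_assoc]
      congr 1
      simp only [pvPos, if_pos h, List.singleton_append, List.map_cons, List.map_map]
      congr 1
      · ring
      · apply List.map_congr_left
        intro i _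
        simp only [Function.comp_apply]
        ring
    · rw [if_neg (by simpa using h), ih (s+1)]
      simp only [pvPos, if_neg h, List.nil_append, List.map_map]
      congr 1
      apply List.map_congr_left
      intro i _
      simp only [Function.comp_apply]
      ring

theorem pvLineStarts_eq (cs : List Char) :
    pvLineStarts cs = 0 :: (pvPos '\n' cs).map (· + 1) := by
  rw [pvLineStarts, pvLineStartsGo cs 0 [0]]
  simp

theorem pvFoldl_units (l : List Char) (acc : Int) :
    l.foldl (fun a ch => a + pvUtf16Units ch) acc
      = acc + (l.map (fun ch => if ch.toNat > 0xFFFF then (2:Int) else 1)).sum := by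
  induction l generalizing acc with
  | nil => simp
  | cons a t ih =>
    rw [List.foldl_cons, ih, List.map_cons, List.sum_cons, pvUtf16Units]
    ring


theorem pv_main (text : String) (offset : Int) :
    offset_to_position text offset = offset_to_position_alt text offset := by
  simp only [offset_to_position, offset_to_position_alt]
  set cs := text.toList with hcs
  have hlen : PySem.Chars.len cs = (cs.length : Int) := by simp
  set off := max 0 (min offset (PySem.Chars.len cs)) with hoff
  have h0 : 0 ≤ off := le_max_left _ _
  have hoffL : off ≤ (cs.length : Int) := by rw [hoff, hlen]; omega
  set n := off.toNat with hndef
  have hni : (n : Int) = off := Int.toNat_of_nonneg h0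
  have hnL : n ≤ cs.length := by omega
  have htklen : (cs.take n).length = n := by simp [hnL]
  have hhead : PySem.List.slice cs none (some off) = cs.take n := PySem.List.slice_to cs h0
  set ph := pvPos '\n' (cs.take n) with hphdef
  set m := ph.length with hmdef
  set tl := (pvPos '\n' (cs.drop n)).map (· + (n : Int)) with htldef
  have hdecomp : pvPos '\n' cs = ph ++ tl := by
    conv_lhs => rw [← List.take_append_drop n cs]
    rw [pvPos_append, htklen]
  have hph : ∀ x ∈ ph, 0 ≤ x ∧ x < (n : Int) := by
    intro x hx
    have := pvPos_mem_bounds '\n' (cs.take n) x hx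
    rwa [htklen] at this
  have htl : ∀ x ∈ tl, (n : Int) ≤ x := by
    intro x hx
    rw [htldef] at hx
    obtain ⟨j, hj, rfl⟩ := List.mem_map.mp hx
    have := (pvPos_mem_bounds '\n' (cs.drop n) j hj).1
    omega
  have hcount : (PySem.Chars.count (PySem.List.slice cs none (some off)) ['\n'] : Int) = (m : Int) := by
    rw [hhead, pvCount_singleton, hmdef, hphdef, pvPos_length]
  have hstarts : pvLineStarts cs = 0 :: (pvPos '\n' cs).map (· + 1) := pvLineStarts_eq cs
  have hsp : (0 :: (pvPos '\n' cs).map (· + 1)).Pairwise (· < ·) := by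
    refine List.pairwise_cons.mpr ⟨?_, List.Pairwise.map _ (by intro a b hab; omega) (pvPos_pairwise _ _)⟩
    intro y hy
    obtain ⟨x, hx, rfl⟩ := List.mem_map.mp hy
    have := (pvPos_mem_bounds '\n' cs x hx).1
    omega
  have hbisect : PySem.List.bisectRight (pvLineStarts cs) off = m + 1 := by
    rw [hstarts, pvBisectRight_eq_countP _ _ hsp]
    have c1 : List.countP ((fun y => decide (y ≤ off)) ∘ (· + 1)) ph = m := by
      rw [hmdef]
      apply List.countP_eq_length.mpr
      intro x hx
      simp only [Function.comp_apply, decide_eq_true_eq]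
      have := hph x hx
      omega
    have c2 : List.countP ((fun y => decide (y ≤ off)) ∘ (· + 1)) tl = 0 := by
      apply List.countP_eq_zero.mpr
      intro x hx
      simp only [Function.comp_apply, decide_eq_true_eq]
      have := htl x hx
      omega
    rw [List.countP_cons, List.countP_map, hdecomp, List.countP_append, c1, c2,
      if_pos (decide_eq_true h0)]
  -- A's line equals B's line
  have Eline : (if ((PySem.List.bisectRight (pvLineStarts cs) off : Int) - 1) < 0 then (0:Int)
        else ((PySem.List.bisectRight (pvLineStarts cs) off : Int) - 1))
      = (PySem.Chars.count (PySem.List.slice cs none (some off)) ['\n'] : Int) := by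
    rw [hbisect, hcount]
    push_cast
    rw [if_neg (by omega)]
    ring
  -- B's line start
  set lsB := PySem.Chars.rfind (PySem.List.slice cs none (some off)) ['\n'] + 1 with hlsdef
  have hrf : PySem.Chars.rfind (PySem.List.slice cs none (some off)) ['\n']
      = (match ph.getLast? with | none => (-1 : Int) | some i => i) := by
    rw [hhead, pvRfind_singleton]
  -- line start, as a case split on ph
  have Els : PySem.List.pyGetD (pvLineStarts cs)
        (PySem.Chars.count (PySem.List.slice cs none (some off)) ['\n'] : Int) 0 = lsB := by
    rw [hcount, hstarts, PySem.List.pyGetD_natCast, hlsdef, hrf]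
    cases hphe : ph with
    | nil => simp [hphe, hmdef]
    | cons q qs =>
      have hne : ph ≠ [] := by rw [hphe]; simp
      rw [← hphe, List.getLast?_eq_some_getLast hne]
      have hm1 : m - 1 < (pvPos '\n' cs).length := by
        rw [hdecomp, List.length_append, ← hmdef]
        have : 0 < m := by rw [hmdef, hphe]; simp
        omega
      have hm0 : 0 < m := by rw [hmdef, hphe]; simp
      -- getD on the cons list at index m = (m-1)+1
      rcases Nat.exists_eq_add_of_lt hm0 with ⟨k, hk⟩
      have hkm : m = k + 1 := by omega
      rw [hkm]
      simp only [List.getD_cons_succ]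
      have hklt : k < ((pvPos '\n' cs).map (· + 1)).length := by
        rw [List.length_map]; omega
      rw [List.getD_eq_getElem _ _ hklt, List.getElem_map]
      have hkph : k < ph.length := by omega
      have : (pvPos '\n' cs)[k]'(by rw [List.length_map] at hklt; omega) = ph[k]'hkph := by
        rw [List.getElem_of_eq hdecomp]
        exact List.getElem_append_left _
      simp only [this, List.getLast_eq_getElem]
      congr 2
      omega
  -- bounds for the line start
  have hls0 : 0 ≤ lsB := by
    rw [hlsdef, hrf]
    cases hphe : ph with
    | nil => simp
    | cons q qs =>
      have hne : ph ≠ [] := by rw [hphe]; simp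
      rw [← hphe, List.getLast?_eq_some_getLast hne]
      dsimp only
      have := (hph _ (List.getLast_mem hne)).1
      omega
  have hlsn : lsB ≤ (n : Int) := by
    rw [hlsdef, hrf]
    cases hphe : ph with
    | nil => simp
    | cons q qs =>
      have hne : ph ≠ [] := by rw [hphe]; simp
      rw [← hphe, List.getLast?_eq_some_getLast hne]
      dsimp only
      have := (hph _ (List.getLast_mem hne)).2
      omega
  have hphls : ∀ x ∈ ph, x < lsB := by
    intro x hx
    have hne : ph ≠ [] := by intro hc; rw [hc] at hx; simp at hx
    have hle := pvLe_getLast ph (pvPos_pairwise _ _) x hx hne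
    rw [hlsdef, hrf, List.getLast?_eq_some_getLast hne]
    dsimp only
    omega
  set k' := lsB.toNat with hk'def
  have hk'i : (k' : Int) = lsB := Int.toNat_of_nonneg hls0
  have hk'L : k' ≤ cs.length := by omega
  have htk'len : (cs.take k').length = k' := by simp [hk'L]
  have hdecomp2 : pvPos '\n' cs = pvPos '\n' (cs.take k') ++ (pvPos '\n' (cs.drop k')).map (· + (k' : Int)) := by
    conv_lhs => rw [← List.take_append_drop k' cs]
    rw [pvPos_append, htk'len]
  -- the two decompositions agree: ph = pvPos of take k', tl = shifted pvPos of drop k'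
  have hfilter1 : (pvPos '\n' cs).filter (fun x => decide (x < lsB)) = ph := by
    rw [hdecomp, List.filter_append]
    rw [List.filter_eq_self.mpr (by intro x hx; exact decide_eq_true (hphls x hx))]
    rw [List.filter_eq_nil_iff.mpr (by
      intro x hx
      simp only [decide_eq_true_eq, not_lt]
      have := htl x hx
      omega), List.append_nil]
  have hfilter2 : (pvPos '\n' cs).filter (fun x => decide (x < lsB)) = pvPos '\n' (cs.take k') := by
    rw [hdecomp2, List.filter_append]
    rw [List.filter_eq_self.mpr (by
      intro x hx
      have := (pvPos_mem_bounds '\n' (cs.take k') x hx).2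
      rw [htk'len] at this
      exact decide_eq_true (by omega))]
    rw [List.filter_eq_nil_iff.mpr (by
      intro x hx
      simp only [decide_eq_true_eq, not_lt]
      obtain ⟨j, hj, rfl⟩ := List.mem_map.mp hx
      have := (pvPos_mem_bounds '\n' (cs.drop k') j hj).1
      omega), List.append_nil]
  have hfilter3 : (pvPos '\n' cs).filter (fun x => !decide (x < lsB)) = tl := by
    rw [hdecomp, List.filter_append]
    rw [List.filter_eq_nil_iff.mpr (by
      intro x hx
      simp only [Bool.not_eq_true', decide_eq_false_iff_not, not_not]
      exact hphls x hx)]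
    rw [List.filter_eq_self.mpr (by
      intro x hx
      have := htl x hx
      simp only [Bool.not_eq_true', decide_eq_false_iff_not, not_lt]
      omega), List.nil_append]
  have hfilter4 : (pvPos '\n' cs).filter (fun x => !decide (x < lsB)) = (pvPos '\n' (cs.drop k')).map (· + (k' : Int)) := by
    rw [hdecomp2, List.filter_append]
    rw [List.filter_eq_nil_iff.mpr (by
      intro x hx
      have := (pvPos_mem_bounds '\n' (cs.take k') x hx).2
      rw [htk'len] at this
      simp only [Bool.not_eq_true', decide_eq_false_iff_not, not_not]
      omega)]
    rw [List.filter_eq_self.mpr (by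
      intro x hx
      obtain ⟨j, hj, rfl⟩ := List.mem_map.mp hx
      have := (pvPos_mem_bounds '\n' (cs.drop k') j hj).1
      simp only [Bool.not_eq_true', decide_eq_false_iff_not, not_lt]
      omega), List.nil_append]
  have hdropEq : (pvPos '\n' (cs.drop k')).map (· + (k' : Int)) = tl := by
    rw [← hfilter4, hfilter3]
  -- find from the line start
  have hff : PySem.Chars.findFrom cs ['\n'] lsB
      = if PySem.Chars.find (cs.drop k') ['\n'] = -1 then -1
        else (k' : Int) + PySem.Chars.find (cs.drop k') ['\n'] := by
    rw [← hk'i]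
    exact PySem.Chars.findFrom_natCast cs ['\n'] k' hk'L
  have hfind : PySem.Chars.find (cs.drop k') ['\n']
      = (match (pvPos '\n' (cs.drop k')).head? with | none => (-1:Int) | some i => i) :=
    pvFind_singleton _ _
  -- line end equality
  have Ele : (if (PySem.Chars.count (PySem.List.slice cs none (some off)) ['\n'] : Int) + 1
          < ((pvLineStarts cs).length : Int)
        then PySem.List.pyGetD (pvLineStarts cs)
          ((PySem.Chars.count (PySem.List.slice cs none (some off)) ['\n'] : Int) + 1) 0
        else PySem.Chars.len cs)
      = (if PySem.Chars.findFrom cs ['\n'] lsB = -1 then PySem.Chars.len cs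
         else PySem.Chars.findFrom cs ['\n'] lsB + 1) := by
    rw [hcount, hstarts, hff, hfind]
    cases hdrop : pvPos '\n' (cs.drop k') with
    | nil =>
      have htlnil : tl = [] := by rw [← hdropEq, hdrop, List.map_nil]
      have hlenpc : (pvPos '\n' cs).length = m := by
        rw [hdecomp, htlnil, List.append_nil, hmdef]
      rw [if_neg (by
        simp only [List.length_cons, List.length_map, hlenpc]
        push_cast
        omega)]
      simp
    | cons x0 xs =>
      have hx00 : 0 ≤ x0 := (pvPos_mem_bounds '\n' (cs.drop k') x0 (by rw [hdrop]; simp)).1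
      have htlc : tl = (x0 + (k' : Int)) :: xs.map (· + (k' : Int)) := by
        rw [← hdropEq, hdrop, List.map_cons]
      have hlenpc : (pvPos '\n' cs).length = m + (xs.length + 1) := by
        rw [hdecomp, htlc, List.length_append, ← hmdef, List.length_cons, List.length_map]
      rw [if_pos (by
        simp only [List.length_cons, List.length_map, hlenpc]
        push_cast
        omega)]
      simp only [List.head?_cons]
      rw [if_neg (by omega), if_neg (by omega)]
      have hcast : ((m : Int) + 1) = ((m + 1 : Nat) : Int) := by push_cast; ring
      rw [hcast, PySem.List.pyGetD_natCast]
      simp only [List.getD_cons_succ]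
      have hmlt : m < ((pvPos '\n' cs).map (· + 1)).length := by
        rw [List.length_map, hlenpc]; omega
      rw [List.getD_eq_getElem _ _ hmlt, List.getElem_map]
      have : (pvPos '\n' cs)[m]'(by rw [List.length_map] at hmlt; omega) = x0 + (k' : Int) := by
        rw [List.getElem_of_eq hdecomp, List.getElem_append_right (by omega)]
        simp [hmdef, htlc]
      simp only [this]
      ring
  rw [Eline, Els, Ele, pvFoldl_units]
  rw [zero_add]

-- ===== VERDICT (by name: the statement is the Claim_ definition above) =====
theorem offset_to_position_spec : Claim_equal_offset_to_position := by
  intro text offset _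
  exact pv_main text offset
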